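-- pv_equiv track=rewrite | github.com/Chengro123/Advent-of-Code-2021 | day10/day10.py | strange_calculator
-- ===== SOURCE A (Python) =====
-- def strange_calculator(completion_list):
--     score = 0
--     for syntax in completion_list:
--         if syntax == 3:
--             score = score*5 + 1
--         elif syntax == 57:
--             score = score*5 + 2
--         elif syntax == 1197:
--             score = score*5 + 3
--         elif syntax == 25137:
--             score = score*5 + 4
--     return(score)
-- ===== SOURCE B (Python) =====
-- _POINTS = {3: 1, 57: 2, 1197: 3, 25137: 4}
--
-- def strange_calculator(completion_list):
--     digits = [_POINTS[s] for s in completion_list if s in _POINTS]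
--     n = len(digits)
--     return sum(d * 5 ** (n - 1 - i) for i, d in enumerate(digits))
-- ===== Notes on version B (the rewrite author's own statement) =====
-- stated objective: alternative
-- what changed: Replaces the single Horner-style accumulating fold with a two-pass build-then-evaluate: first map-and-filter the codes into base-5 digits via a lookup table, then compute a positional power sum over the digit list.
import Mathlib
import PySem

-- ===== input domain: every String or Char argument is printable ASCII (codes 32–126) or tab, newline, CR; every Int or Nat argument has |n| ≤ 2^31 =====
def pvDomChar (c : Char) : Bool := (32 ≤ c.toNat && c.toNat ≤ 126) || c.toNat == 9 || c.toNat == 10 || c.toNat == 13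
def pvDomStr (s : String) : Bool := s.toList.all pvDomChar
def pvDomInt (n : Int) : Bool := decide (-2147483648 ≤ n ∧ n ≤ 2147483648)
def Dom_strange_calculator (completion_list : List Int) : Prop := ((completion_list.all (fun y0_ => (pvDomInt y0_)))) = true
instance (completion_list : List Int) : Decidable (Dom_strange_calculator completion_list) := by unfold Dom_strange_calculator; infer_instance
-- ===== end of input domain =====

-- B replaces the single Horner-style accumulating fold by a two-pass build-then-evaluate:
-- map-and-filter the codes into base-5 digits via a lookup table, then a positional power sum (objective: alternative).

-- ===== PORT A =====
def strange_calculator (completion_list : List Int) : Int :=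
  completion_list.foldl (fun score syn =>
    if syn = 3 then score * 5 + 1
    else if syn = 57 then score * 5 + 2
    else if syn = 1197 then score * 5 + 3
    else if syn = 25137 then score * 5 + 4
    else score) 0

-- ===== PORT B =====
def pvPoints : PySem.Dict Int Int := PySem.Dict.ofList [(3, 1), (57, 2), (1197, 3), (25137, 4)]

def strange_calculator_alt (completion_list : List Int) : Int :=
  let digits := completion_list.filterMap (fun s => PySem.Dict.get? pvPoints s)
  let n : Int := digits.length
  (PySem.List.enumerate digits).foldl
    (fun acc p => acc + p.2 * (5 : Int) ^ ((n - 1 - p.1).toNat)) 0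

-- ===== PRECONDITION & SPEC =====
def Spec_strange_calculator (completion_list : List Int) (out : Int) : Prop := out = strange_calculator_alt completion_list
instance (completion_list : List Int) (out : Int) : Decidable (Spec_strange_calculator completion_list out) := by unfold Spec_strange_calculator; infer_instance

-- ===== CLAIM (what is proved, stated in full; the proofs are below) =====
def Claim_equal_strange_calculator : Prop := ∀ (completion_list : List Int), Dom_strange_calculator completion_list → Spec_strange_calculator completion_list (strange_calculator completion_list)

-- ===== LEMMAS AND PROOFS =====

-- ===== VERDICT (by name: the statement is the Claim_ definition above) =====
-- H ds = the positional base-5 value of the digit list ds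
def pvH : List Int → Int
  | [] => 0
  | d :: ds => d * (5 : Int) ^ ds.length + pvH ds

theorem pv_horner (ds : List Int) (acc : Int) :
    ds.foldl (fun a d => a * 5 + d) acc = acc * (5 : Int) ^ ds.length + pvH ds := by
  induction ds generalizing acc with
  | nil => simp [pvH]
  | cons d ds ih =>
    simp only [List.foldl_cons, ih, pvH, List.length_cons, pow_succ]
    ring

theorem pv_A_filter (l : List Int) (acc : Int) :
    l.foldl (fun score syn =>
      if syn = 3 then score * 5 + 1
      else if syn = 57 then score * 5 + 2
      else if syn = 1197 then score * 5 + 3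
      else if syn = 25137 then score * 5 + 4
      else score) acc
    = (l.filterMap (fun s => PySem.Dict.get? pvPoints s)).foldl (fun a d => a * 5 + d) acc := by
  induction l generalizing acc with
  | nil => rfl
  | cons x l ih =>
    have h : PySem.Dict.get? pvPoints x =
        if x = 3 then some 1 else if x = 57 then some 2
        else if x = 1197 then some 3 else if x = 25137 then some 4 else none := by
      have hit : pvPoints.items = [(3, 1), (57, 2), (1197, 3), (25137, 4)] := by rfl
      simp only [PySem.Dict.get?, hit]
      split_ifs with h1 h2 h3 h4
      · subst h1; rfl
      · subst h2; rfl
      · subst h3; rfl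
      · subst h4; rfl
      · have e1 : ((3 : Int) == x) = false := beq_eq_false_iff_ne.mpr (fun e => h1 e.symm)
        have e2 : ((57 : Int) == x) = false := beq_eq_false_iff_ne.mpr (fun e => h2 e.symm)
        have e3 : ((1197 : Int) == x) = false := beq_eq_false_iff_ne.mpr (fun e => h3 e.symm)
        have e4 : ((25137 : Int) == x) = false := beq_eq_false_iff_ne.mpr (fun e => h4 e.symm)
        simp [List.find?, e1, e2, e3, e4]
    simp only [List.foldl_cons, List.filterMap_cons, h]
    split_ifs <;> simp_all [ih]

theorem pv_B_enum (n : Int) (ds : List Int) (s : Int) (acc : Int)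
    (hs : 0 ≤ s) (hn : s + ds.length = n) :
    (PySem.List.enumerate ds s).foldl
      (fun acc p => acc + p.2 * (5 : Int) ^ ((n - 1 - p.1).toNat)) acc
    = acc + pvH ds := by
  induction ds generalizing s acc with
  | nil => simp [PySem.List.enumerate_nil, pvH]
  | cons d ds ih =>
    rw [PySem.List.enumerate_cons, List.foldl_cons,
      ih (s + 1) _ (by omega) (by simp only [List.length_cons] at hn; push_cast at hn ⊢; omega)]
    have he : (n - 1 - s).toNat = ds.length := by
      simp only [List.length_cons] at hn; push_cast at hn; omega
    rw [he, pvH]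
    ring

theorem strange_calculator_spec : Claim_equal_strange_calculator := by
  intro l _
  unfold Spec_strange_calculator strange_calculator strange_calculator_alt
  rw [pv_A_filter, pv_horner, pv_B_enum _ _ 0 0 le_rfl (by simp)]
  ring
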